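-- pv_equiv track=rewrite | github.com/brandonneth/MiniModeling | automating.py | conversion_coefficient_function
-- ===== SOURCE A (Python) =====
-- def for_loop_nest(nesting_order, statement):
-- 	decls = ['for(int i%(num)d = 0; i%(num)d < N%(num)d; i%(num)d++) {' % {'num' : i} for i in tuple(nesting_order)]
--
-- 	nest = ''
-- 	indent = 0
-- 	for decl in decls:
-- 		nest += indent * ' ' + decl + '\n'
-- 		indent += 1
--
-- 	nest += indent*' ' + statement + '\n'
--
-- 	for decl in decls:
-- 		indent -= 1
-- 		nest += indent * " " + "}\n"
--
-- 	return nest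
--
-- def conversion_coefficient_name(layout_in, layout_out, nesting_order):
-- 	start = 'conv'
-- 	in_part = "_".join([str(l) for l in layout_in])
-- 	out_part = "_".join([str(l) for l in layout_out])
-- 	by_part = "_".join([str(l) for l in nesting_order])
-- 	return start + '_' + in_part + '_to_' + out_part + "_by_" + by_part
--
-- def conversion_coefficient_function_name(layout_in, layout_out, nesting_order):
-- 	start = 'conversion_coefficient_evaluation'
-- 	in_part = "_".join([str(l) for l in layout_in])
-- 	out_part = "_".join([str(l) for l in layout_out])
-- 	by_part = "_".join([str(l) for l in nesting_order])
-- 	return start + '_' + in_part + '_to_' + out_part + "_by_" + by_part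
--
-- def conversion_coefficient_function(layout_in, layout_out, nesting_order):
--
-- 	template_line = "template <typename VIEW>"
--
-- 	func_name_line = 'void ' + conversion_coefficient_function_name(layout_in, layout_out, nesting_order)
--
-- 	params = "VIEW in, VIEW out"
-- 	params_line = "(" + params + ") {"
--
--
-- 	start_line = 'auto start = std::clock();'
--
--
-- 	in_access = ','.join(['i'+str(l) for l in layout_in])
-- 	out_access = ','.join(['i'+str(l) for l in layout_out])
--
-- 	statement = 'out(' + out_access + ") = in(" + in_access + ");"
--
-- 	for_loop = for_loop_nest(nesting_order, statement)
--
-- 	stop_line = 'auto stop = std::clock();'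
-- 	t_line = 'auto t = stop - start;'
-- 	print_line = 'std::cout << "{} = " << t << std::endl;'.format(conversion_coefficient_name(layout_in, layout_out, nesting_order))
--
-- 	close_line = '}'
--
-- 	lines = [template_line, func_name_line, params_line, start_line, for_loop, stop_line, t_line, print_line, close_line]
-- 	return '\n'.join(lines)
-- ===== SOURCE B (Python) =====
-- # B: the loop nest is generated by ONE loop over a single line-index j in
-- # range(2n+1) with the closed-form symmetric indent min(j, 2n-j) -- header for
-- # j < n, statement at j = n, closing brace after -- replacing A's two passes
-- # with a mutable indent counter; the whole output is one flat line list joined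
-- # once, around a shared name suffix.
--
-- def _suffix(layout_in, layout_out, nesting_order):
--     return ("_".join(str(l) for l in layout_in)
--             + "_to_" + "_".join(str(l) for l in layout_out)
--             + "_by_" + "_".join(str(l) for l in nesting_order))
--
-- def conversion_coefficient_function(layout_in, layout_out, nesting_order):
--     sfx = _suffix(layout_in, layout_out, nesting_order)
--     statement = ('out(' + ','.join('i' + str(l) for l in layout_out)
--                  + ') = in(' + ','.join('i' + str(l) for l in layout_in) + ');')
--     n = len(nesting_order)
--     lines = ['template <typename VIEW>',
--              'void conversion_coefficient_evaluation_' + sfx,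
--              '(VIEW in, VIEW out) {',
--              'auto start = std::clock();']
--     for j in range(2 * n + 1):
--         ind = min(j, 2 * n - j) * ' '
--         if j < n:
--             v = nesting_order[j]
--             lines.append(ind + 'for(int i%d = 0; i%d < N%d; i%d++) {' % (v, v, v, v))
--         elif j == n:
--             lines.append(ind + statement)
--         else:
--             lines.append(ind + '}')
--     lines += ['',
--               'auto stop = std::clock();',
--               'auto t = stop - start;',
--               'std::cout << "conv_' + sfx + ' = " << t << std::endl;',
--               '}']
--     return '\n'.join(lines)
-- ===== Notes on version B (the rewrite author's own statement) =====
-- stated objective: alternative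
-- what changed: The loop nest is generated by a single loop over one line index j in range(2n+1) using the closed-form symmetric indent min(j, 2n-j) (header below n, statement at n, closing brace above), replacing A's pre-built decls list and two sequential passes with a mutable indent counter, and the whole output is assembled as one flat line list joined once around a shared name suffix instead of A's nested join of a line list built with two near-duplicate name helpers.
import Mathlib
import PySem

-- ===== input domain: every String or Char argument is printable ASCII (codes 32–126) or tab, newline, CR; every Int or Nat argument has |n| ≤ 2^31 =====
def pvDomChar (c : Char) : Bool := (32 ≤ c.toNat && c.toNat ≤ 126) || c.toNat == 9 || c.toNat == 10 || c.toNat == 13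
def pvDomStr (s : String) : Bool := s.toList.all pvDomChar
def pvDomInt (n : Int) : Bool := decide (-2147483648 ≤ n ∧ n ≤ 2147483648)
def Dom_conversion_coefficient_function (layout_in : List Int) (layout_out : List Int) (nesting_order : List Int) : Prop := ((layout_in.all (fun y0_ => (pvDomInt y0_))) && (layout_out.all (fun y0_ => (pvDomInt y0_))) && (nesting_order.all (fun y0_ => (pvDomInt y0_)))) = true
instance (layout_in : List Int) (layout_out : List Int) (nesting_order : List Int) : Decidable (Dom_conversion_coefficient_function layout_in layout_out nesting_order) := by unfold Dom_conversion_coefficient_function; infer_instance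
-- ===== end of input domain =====

-- ===== PORT A =====
-- B generates the loop nest with one loop over a single line index and the
-- closed-form symmetric indent min(j, 2n-j), instead of A's two passes with a
-- mutable indent counter (objective: alternative, same cost).
def pvSpaces (n : Nat) : String := String.ofList (List.replicate n ' ')

def fln_decl (i : Int) : String :=
  "for(int i" ++ PySem.Int.toStr i ++ " = 0; i" ++ PySem.Int.toStr i ++ " < N"
    ++ PySem.Int.toStr i ++ "; i" ++ PySem.Int.toStr i ++ "++) {"

def fln_loop1 : List String → String → Nat → String × Nat
  | [], nest, indent => (nest, indent)
  | d :: ds, nest, indent => fln_loop1 ds (nest ++ pvSpaces indent ++ d ++ "\n") (indent + 1)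

def fln_loop2 : List String → String → Nat → String
  | [], nest, _ => nest
  | _ :: ds, nest, indent => fln_loop2 ds (nest ++ pvSpaces (indent - 1) ++ "}\n") (indent - 1)

def for_loop_nest (nesting_order : List Int) (statement : String) : String :=
  let decls := nesting_order.map fln_decl
  let p := fln_loop1 decls "" 0
  fln_loop2 decls (p.1 ++ pvSpaces p.2 ++ statement ++ "\n") p.2

def conversion_coefficient_name (layout_in layout_out nesting_order : List Int) : String :=
  "conv" ++ "_" ++ PySem.Str.join "_" (layout_in.map PySem.Int.toStr) ++ "_to_"
    ++ PySem.Str.join "_" (layout_out.map PySem.Int.toStr) ++ "_by_"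
    ++ PySem.Str.join "_" (nesting_order.map PySem.Int.toStr)

def conversion_coefficient_function_name (layout_in layout_out nesting_order : List Int) : String :=
  "conversion_coefficient_evaluation" ++ "_" ++ PySem.Str.join "_" (layout_in.map PySem.Int.toStr) ++ "_to_"
    ++ PySem.Str.join "_" (layout_out.map PySem.Int.toStr) ++ "_by_"
    ++ PySem.Str.join "_" (nesting_order.map PySem.Int.toStr)

def conversion_coefficient_function (layout_in : List Int) (layout_out : List Int) (nesting_order : List Int) : String :=
  let template_line := "template <typename VIEW>"
  let func_name_line := "void " ++ conversion_coefficient_function_name layout_in layout_out nesting_order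
  let params_line := "(" ++ "VIEW in, VIEW out" ++ ") {"
  let start_line := "auto start = std::clock();"
  let in_access := PySem.Str.join "," (layout_in.map (fun l => "i" ++ PySem.Int.toStr l))
  let out_access := PySem.Str.join "," (layout_out.map (fun l => "i" ++ PySem.Int.toStr l))
  let statement := "out(" ++ out_access ++ ") = in(" ++ in_access ++ ");"
  let for_loop := for_loop_nest nesting_order statement
  let stop_line := "auto stop = std::clock();"
  let t_line := "auto t = stop - start;"
  let print_line := "std::cout << \"" ++ conversion_coefficient_name layout_in layout_out nesting_order ++ " = \" << t << std::endl;"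
  let close_line := "}"
  PySem.Str.join "\n" [template_line, func_name_line, params_line, start_line, for_loop, stop_line, t_line, print_line, close_line]

-- ===== PORT B =====
def pvSuffix (layout_in layout_out nesting_order : List Int) : String :=
  PySem.Str.join "_" (layout_in.map PySem.Int.toStr) ++ "_to_"
    ++ PySem.Str.join "_" (layout_out.map PySem.Int.toStr) ++ "_by_"
    ++ PySem.Str.join "_" (nesting_order.map PySem.Int.toStr)

def pvDecl (v : Int) : String :=
  "for(int i" ++ PySem.Int.toStr v ++ " = 0; i" ++ PySem.Int.toStr v ++ " < N"
    ++ PySem.Int.toStr v ++ "; i" ++ PySem.Int.toStr v ++ "++) {"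

-- Source B's loop body for line index j: symmetric indent, header / statement / brace.
-- '.toNat' is exact here (0 ≤ j and 0 ≤ 2n-j on range(2n+1)); pyGetD's default 0
-- is unreachable (j < n is in range).
def pvNestLine (nesting_order : List Int) (statement : String) (n : Int) (j : Int) : String :=
  pvSpaces (min j (2 * n - j)).toNat
    ++ (if j < n then pvDecl (PySem.List.pyGetD nesting_order j 0)
        else if j = n then statement
        else "}")

def conversion_coefficient_function_alt (layout_in : List Int) (layout_out : List Int) (nesting_order : List Int) : String :=
  let sfx := pvSuffix layout_in layout_out nesting_order
  let statement := "out(" ++ PySem.Str.join "," (layout_out.map (fun l => "i" ++ PySem.Int.toStr l))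
      ++ ") = in(" ++ PySem.Str.join "," (layout_in.map (fun l => "i" ++ PySem.Int.toStr l)) ++ ");"
  let n : Int := nesting_order.length
  let lines : List String :=
    ["template <typename VIEW>",
     "void conversion_coefficient_evaluation_" ++ sfx,
     "(VIEW in, VIEW out) {",
     "auto start = std::clock();"]
    ++ (PySem.List.pyRange 0 (2 * n + 1) 1).map (pvNestLine nesting_order statement n)
    ++ ["",
        "auto stop = std::clock();",
        "auto t = stop - start;",
        "std::cout << \"conv_" ++ sfx ++ " = \" << t << std::endl;",
        "}"]
  PySem.Str.join "\n" lines

-- ===== PRECONDITION & SPEC =====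
def Spec_conversion_coefficient_function (layout_in : List Int) (layout_out : List Int) (nesting_order : List Int) (out : String) : Prop := out = conversion_coefficient_function_alt layout_in layout_out nesting_order
instance (layout_in : List Int) (layout_out : List Int) (nesting_order : List Int) (out : String) : Decidable (Spec_conversion_coefficient_function layout_in layout_out nesting_order out) := by unfold Spec_conversion_coefficient_function; infer_instance

-- ===== CLAIM (what is proved, stated in full; the proofs are below) =====
def Claim_equal_conversion_coefficient_function : Prop := ∀ (layout_in : List Int) (layout_out : List Int) (nesting_order : List Int), Dom_conversion_coefficient_function layout_in layout_out nesting_order → Spec_conversion_coefficient_function layout_in layout_out nesting_order (conversion_coefficient_function layout_in layout_out nesting_order)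

-- ===== LEMMAS AND PROOFS =====
-- characterisation of A's first loop: it appends the header lines
def pvHdr : List String → Nat → String
  | [], _ => ""
  | d :: ds, k => pvSpaces k ++ d ++ "\n" ++ pvHdr ds (k + 1)

-- characterisation of A's second loop: m closing braces at indents k-1, k-2, …
def pvCls : Nat → Nat → String
  | 0, _ => ""
  | m + 1, k => pvSpaces (k - 1) ++ "}\n" ++ pvCls m (k - 1)

-- the header lines of B's single loop, as a list
def pvHdrL : List Int → Nat → List String
  | [], _ => []
  | v :: vs, k => (pvSpaces k ++ fln_decl v) :: pvHdrL vs (k + 1)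

-- the closer lines of B's single loop, indents m-1 down to 0
def pvClsL : Nat → List String
  | 0 => []
  | m + 1 => (pvSpaces m ++ "}") :: pvClsL m

lemma loop1_eq (ds : List String) : ∀ (s : String) (k : Nat),
    fln_loop1 ds s k = (s ++ pvHdr ds k, k + ds.length) := by
  induction ds with
  | nil => intro s k; simp [fln_loop1, pvHdr]
  | cons d ds ih =>
      intro s k
      simp only [fln_loop1, pvHdr, ih, List.length_cons]
      rw [Prod.mk.injEq]
      exact ⟨by apply String.toList_inj.mp; simp, by omega⟩

lemma loop2_eq (ds : List String) : ∀ (s : String) (k : Nat),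
    fln_loop2 ds s k = s ++ pvCls ds.length k := by
  induction ds with
  | nil =>
      intro s k
      apply String.toList_inj.mp; simp [fln_loop2, pvCls]
  | cons d ds ih =>
      intro s k
      simp only [fln_loop2, List.length_cons, pvCls, ih]
      apply String.toList_inj.mp; simp

-- A's nest as headers ++ statement ++ descending closers
lemma nestA (no : List Int) (st : String) :
    for_loop_nest no st
      = pvHdr (no.map fln_decl) 0 ++ pvSpaces no.length ++ st ++ "\n"
          ++ pvCls no.length no.length := by
  simp only [for_loop_nest, loop1_eq, loop2_eq, List.length_map, Nat.zero_add]
  apply String.toList_inj.mp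
  simp

lemma join_cons_ne (x : String) (l : List String) (h : l ≠ []) :
    PySem.Str.join "\n" (x :: l) = x ++ "\n" ++ PySem.Str.join "\n" l := by
  cases l with
  | nil => exact absurd rfl h
  | cons y ys =>
      apply String.toList_inj.mp
      simp [PySem.Str.join, PySem.Chars.join_cons_cons]

lemma join4 (a b c d : String) (rest : List String) (h : rest ≠ []) :
    PySem.Str.join "\n" (a :: b :: c :: d :: rest)
      = a ++ "\n" ++ (b ++ "\n" ++ (c ++ "\n" ++ (d ++ "\n" ++ PySem.Str.join "\n" rest))) := by
  rw [join_cons_ne a _ (by simp), join_cons_ne b _ (by simp), join_cons_ne c _ (by simp),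
    join_cons_ne d _ h]

-- B's header segment: range [|pre|, |no|) maps to the header lines of the rest
lemma mapHdr (no : List Int) (st : String) (suf : List Int) : ∀ (pre : List Int), no = pre ++ suf →
    (PySem.List.pyRange (pre.length : Int) (no.length : Int) 1).map
        (pvNestLine no st (no.length : Int))
      = pvHdrL suf pre.length := by
  induction suf with
  | nil =>
      intro pre hno
      rw [PySem.List.pyRange_one_eq_nil (by simp [hno])]
      simp [pvHdrL]
  | cons v vs ih =>
      intro pre hno
      have hlen : (pre.length : Int) < (no.length : Int) := by
        subst hno
        simp only [List.length_append, List.length_cons]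
        push_cast
        omega
      rw [PySem.List.pyRange_one_cons hlen, List.map_cons]
      have hget : PySem.List.pyGetD no (pre.length : Int) 0 = v := by
        subst hno
        rw [PySem.List.pyGetD_natCast]
        simp [List.getD_eq_getElem?_getD]
      have hmin : (min (pre.length : Int) (2 * (no.length : Int) - pre.length)).toNat
          = pre.length := by
        have h1 : (pre.length : Int) ≤ (no.length : Int) := le_of_lt hlen
        omega
      have hline : pvNestLine no st (no.length : Int) (pre.length : Int)
          = pvSpaces pre.length ++ fln_decl v := by
        simp only [pvNestLine, if_pos hlen, hget, hmin]
        rfl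
      have hpre1 : ((pre ++ [v]).length : Int) = (pre.length : Int) + 1 := by simp
      have htail := ih (pre ++ [v]) (by simp [hno])
      rw [hpre1] at htail
      rw [hline, htail]
      simp [pvHdrL]

-- B's closer segment: range (2n+1-m, 2n+1) maps to m closer lines
lemma mapCls (no : List Int) (st : String) : ∀ (m : Nat), m ≤ no.length →
    (PySem.List.pyRange (2 * (no.length : Int) + 1 - m) (2 * (no.length : Int) + 1) 1).map
        (pvNestLine no st (no.length : Int))
      = pvClsL m := by
  intro m
  induction m with
  | zero =>
      intro _
      rw [PySem.List.pyRange_one_eq_nil (by omega)]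
      simp [pvClsL]
  | succ m ih =>
      intro hm
      have hlt : 2 * (no.length : Int) + 1 - (m + 1 : Nat) < 2 * (no.length : Int) + 1 := by
        omega
      rw [PySem.List.pyRange_one_cons hlt, List.map_cons]
      have hj : 2 * (no.length : Int) + 1 - (m + 1 : Nat) = 2 * (no.length : Int) - m := by
        omega
      have hnotlt : ¬ (2 * (no.length : Int) - m < (no.length : Int)) := by omega
      have hne : ¬ (2 * (no.length : Int) - m = (no.length : Int)) := by omega
      have hmin : (min (2 * (no.length : Int) - m)
          (2 * (no.length : Int) - (2 * (no.length : Int) - m))).toNat = m := by omega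
      have hline : pvNestLine no st (no.length : Int) (2 * (no.length : Int) - m)
          = pvSpaces m ++ "}" := by
        simp only [pvNestLine, if_neg hnotlt, if_neg hne, hmin]
      have htail : 2 * (no.length : Int) - m + 1 = 2 * (no.length : Int) + 1 - (m : Nat) := by
        omega
      rw [hj, hline, htail, ih (by omega)]
      rfl

-- joining B's header lines prepends A's header string
lemma joinHdr (vs : List Int) : ∀ (k : Nat) (L : List String), L ≠ [] →
    PySem.Str.join "\n" (pvHdrL vs k ++ L)
      = pvHdr (vs.map fln_decl) k ++ PySem.Str.join "\n" L := by
  induction vs with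
  | nil =>
      intro k L _
      apply String.toList_inj.mp
      simp [pvHdrL, pvHdr]
  | cons v vs ih =>
      intro k L hL
      have htail : pvHdrL vs (k + 1) ++ L ≠ [] := by
        intro h
        exact hL (List.append_eq_nil_iff.mp h).2
      rw [show pvHdrL (v :: vs) k ++ L
            = (pvSpaces k ++ fln_decl v) :: (pvHdrL vs (k + 1) ++ L) from by simp [pvHdrL],
          join_cons_ne _ _ htail, ih (k + 1) L hL]
      apply String.toList_inj.mp
      simp [pvHdr]

-- joining statement line + closers + trailing lines gives A's closer string
lemma joinCls : ∀ (m : Nat) (x : String) (L : List String), L ≠ [] →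
    PySem.Str.join "\n" ((x :: pvClsL m) ++ L)
      = x ++ "\n" ++ pvCls m m ++ PySem.Str.join "\n" L := by
  intro m
  induction m with
  | zero =>
      intro x L hL
      rw [show (x :: pvClsL 0) ++ L = x :: L from by simp [pvClsL],
        join_cons_ne _ _ hL]
      apply String.toList_inj.mp
      simp [pvCls]
  | succ m ih =>
      intro x L hL
      have h1 : (x :: pvClsL (m + 1)) ++ L
          = x :: (((pvSpaces m ++ "}") :: pvClsL m) ++ L) := by simp [pvClsL]
      have h2 : ((pvSpaces m ++ "}") :: pvClsL m) ++ L ≠ [] := by simp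
      rw [h1, join_cons_ne _ _ h2, ih (pvSpaces m ++ "}") L hL]
      have h3 : pvCls (m + 1) (m + 1) = pvSpaces m ++ "}\n" ++ pvCls m m := by
        show pvSpaces (m + 1 - 1) ++ "}\n" ++ pvCls m (m + 1 - 1) = _
        simp
      rw [h3]
      apply String.toList_inj.mp
      simp

-- B's whole nest segment (with the trailing lines L) equals A's nest string ++ join L
lemma nestB (no : List Int) (st : String) (L : List String) (hL : L ≠ []) :
    PySem.Str.join "\n"
        ((PySem.List.pyRange 0 (2 * (no.length : Int) + 1) 1).map
            (pvNestLine no st (no.length : Int)) ++ L)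
      = for_loop_nest no st ++ PySem.Str.join "\n" L := by
  have hsplit1 : PySem.List.pyRange 0 (2 * (no.length : Int) + 1) 1
      = PySem.List.pyRange 0 (no.length : Int) 1
          ++ PySem.List.pyRange (no.length : Int) (2 * (no.length : Int) + 1) 1 :=
    PySem.List.pyRange_one_append 0 (no.length : Int) _ (by omega) (by omega)
  have hsplit2 : PySem.List.pyRange (no.length : Int) (2 * (no.length : Int) + 1) 1
      = PySem.List.pyRange (no.length : Int) ((no.length : Int) + 1) 1
          ++ PySem.List.pyRange ((no.length : Int) + 1) (2 * (no.length : Int) + 1) 1 :=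
    PySem.List.pyRange_one_append _ ((no.length : Int) + 1) _ (by omega) (by omega)
  have hmid : PySem.List.pyRange (no.length : Int) ((no.length : Int) + 1) 1
      = [(no.length : Int)] := PySem.List.pyRange_one_singleton _
  have hminN : (min ((no.length : Int)) (2 * (no.length : Int) - (no.length : Int))).toNat
      = no.length := by omega
  have hstmt : pvNestLine no st (no.length : Int) (no.length : Int)
      = pvSpaces no.length ++ st := by
    simp only [pvNestLine, hminN]
    rw [if_neg (by omega)]
    simp
  have hclsarg : ((no.length : Int) + 1) = 2 * (no.length : Int) + 1 - (no.length : Nat) := by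
    omega
  have hhd := mapHdr no st no [] rfl
  rw [List.length_nil, Nat.cast_zero] at hhd
  have hcl := mapCls no st no.length (le_refl _)
  rw [hsplit1, hsplit2, hmid, List.map_append, List.map_append, List.map_singleton,
    hhd, hstmt, hclsarg, hcl, nestA]
  have hshape : [pvSpaces no.length ++ st] ++ pvClsL no.length ++ L
      = ((pvSpaces no.length ++ st) :: pvClsL no.length) ++ L := by simp
  have hne1 : ((pvSpaces no.length ++ st) :: pvClsL no.length) ++ L ≠ [] := by simp
  rw [List.append_assoc, hshape, joinHdr no 0 _ hne1, joinCls no.length _ L hL]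
  apply String.toList_inj.mp
  simp

-- ===== VERDICT (by name: the statement is the Claim_ definition above) =====
set_option maxRecDepth 8192 in
theorem conversion_coefficient_function_spec : Claim_equal_conversion_coefficient_function := by
  intro layout_in layout_out nesting_order _
  unfold Spec_conversion_coefficient_function
  simp only [conversion_coefficient_function, conversion_coefficient_function_alt,
    conversion_coefficient_name, conversion_coefficient_function_name, pvSuffix]
  simp only [List.cons_append, List.nil_append]
  rw [join4 _ _ _ _ _ (by simp), join4 _ _ _ _ _ (by simp), join4 _ _ _ _ _ (by simp),
    nestB _ _ _ (by simp), join4 _ _ _ _ _ (by simp)]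
  apply String.toList_inj.mp
  simp [PySem.Str.join, PySem.Chars.join_singleton]
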